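-- pv_equiv track=rewrite | github.com/vivek-Havalad/python_practice | shifter_rost.py | TheEngine
-- ===== SOURCE A (Python) =====
-- def shifter(Q):
--     Q.append(Q.pop(0))
--     return Q
--
-- def comparator(P, Q):
--     compare_cnt = 0
--     if len(P) >= len(Q):
--         for c1 in P:
--             for c2 in Q:
--                 if c1 != c2:
--                     return  compare_cnt
--                 compare_cnt += 1
--     else:
--         for c1 in Q:
--             for c2 in P:
--                 if c1 != c2:
--                     return  compare_cnt
--                 compare_cnt += 1
--
-- def TheEngine(P, Q):
--     compared_prefix = 0
--     rotated = 0
--     till_rotated = 0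
--     for x in range(len(Q)):
--         compared_prefix_result = comparator(P, Q)
--         if compared_prefix_result > compared_prefix:
--             compared_prefix = compared_prefix_result
--             till_rotated = rotated
--         Q = shifter(Q)
--         rotated += 1
--     return till_rotated
-- ===== SOURCE B (Python) =====
-- def TheEngine(P, Q):
--     # O(n+m): precompute circular runs of one value in Q once, score every rotation in O(1).
--     n = len(Q)
--     if n == 0:
--         return 0
--     m = len(P)
--     v = P[0]
--
--     def circ_runs():
--         # run of consecutive elements equal to v starting at each position, circularly
--         run2 = [0] * (2 * n)
--         for i in range(2 * n - 1, -1, -1):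
--             nxt = run2[i + 1] if i + 1 < 2 * n else 0
--             if Q[i % n] == v:
--                 run2[i] = nxt + 1
--         return [min(run2[i], n) for i in range(n)]
--
--     if m >= n:
--         if all(q == Q[0] for q in Q):
--             return 0  # every rotation scores the same, first rotation wins
--         scores = circ_runs()
--     else:
--         if all(p == v for p in P):
--             scores = [r * m for r in circ_runs()]
--         else:
--             h = 0
--             while h < m and P[h] == v:
--                 h += 1
--             scores = [h if Q[x] == v else 0 for x in range(n)]
--
--     best = 0
--     till = 0
--     for x, s in enumerate(scores):
--         if s > best:
--             best = s
--             till = x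
--     return till
-- ===== Notes on version B (the rewrite author's own statement) =====
-- stated objective: faster
-- what changed: A re-runs the quadratic comparator on every rotation of Q (rotating the list in place each time); B precomputes the circular runs of P[0] (resp. of P's constant value) in Q once with a doubled-array suffix scan and scores every rotation in O(1), then takes the argmax in one pass.
-- outside the precondition, e.g. on TheEngine([], [1]): A raises TypeError, B raises IndexError; on TheEngine([1], [1, 1]): A raises TypeError, B returns 0
import Mathlib
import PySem

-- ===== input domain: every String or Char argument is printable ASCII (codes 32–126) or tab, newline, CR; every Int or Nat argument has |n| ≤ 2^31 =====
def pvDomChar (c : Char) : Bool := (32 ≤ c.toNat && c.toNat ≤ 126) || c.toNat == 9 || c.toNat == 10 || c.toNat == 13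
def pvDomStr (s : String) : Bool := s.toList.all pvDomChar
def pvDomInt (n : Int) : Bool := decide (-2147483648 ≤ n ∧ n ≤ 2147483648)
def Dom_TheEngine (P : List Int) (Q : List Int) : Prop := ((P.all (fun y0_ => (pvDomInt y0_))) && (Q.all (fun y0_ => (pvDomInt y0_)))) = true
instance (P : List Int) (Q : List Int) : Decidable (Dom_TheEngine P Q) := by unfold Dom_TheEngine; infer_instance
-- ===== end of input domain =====

-- B replaces A's rotate-and-rescan O(n·(n+m)) search by one precomputation of circular
-- runs in Q, scoring every rotation in O(1) (objective: faster, asymptotic).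
-- A mutates Q in place while looping, but a full cycle of rotations restores it, so the
-- caller observes no net mutation; the equivalence is about the return value.

-- ===== PORT A =====
-- comparator's inner `for c2 in S` loop: .error = early `return compare_cnt`, .ok = loop finished
def pvInner (c1 : Int) (S : List Int) (acc : Int) : Except Int Int :=
  match S with
  | [] => .ok acc
  | c2 :: rest => if c1 ≠ c2 then .error acc else pvInner c1 rest (acc + 1)

-- comparator's outer `for c1 in L` loop; none = function falls through (Python returns None)
def pvOuter (L S : List Int) (acc : Int) : Option Int :=
  match L with
  | [] => none
  | c1 :: rest =>
    match pvInner c1 S acc with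
    | .error v => some v
    | .ok acc' => pvOuter rest S acc'

def pvComparator (P Q : List Int) : Option Int :=
  if Q.length ≤ P.length then pvOuter P Q 0 else pvOuter Q P 0

-- shifter: Q.append(Q.pop(0)); Q is never [] when called
def pvShifter (Q : List Int) : List Int :=
  match Q with
  | [] => []
  | h :: t => t ++ [h]

-- TheEngine's `for x in range(len(Q))` loop; none = the comparison `None > int` raises TypeError
def pvEngineLoop (P : List Int) : Nat → List Int → Int → Int → Int → Option Int
  | 0, _, _, _, till => some till
  | k + 1, Q, cp, rot, till =>
    match pvComparator P Q with
    | none => none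
    | some r =>
      if r > cp then pvEngineLoop P k (pvShifter Q) r (rot + 1) rot
      else pvEngineLoop P k (pvShifter Q) cp (rot + 1) till

def TheEngine (P : List Int) (Q : List Int) : Int :=
  (pvEngineLoop P Q.length Q 0 0 0).getD 0

-- ===== PORT B =====
-- Source B's `while h < m and P[h] == v` head-run count
def pvHeadRunLen (L : List Int) (v : Int) : Int :=
  match L with
  | [] => 0
  | a :: t => if a = v then pvHeadRunLen t v + 1 else 0

-- Source B's run2 array built back to front: returns [run2[i], run2[i+1], …, run2[2n-1]]
def pvRuns2Go (Q : List Int) (v : Int) (n : Nat) : Nat → Nat → List Int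
  | 0, _ => []
  | fuel + 1, i =>
    let rest := pvRuns2Go Q v n fuel (i + 1)
    (if Q.getD (i % n) 0 = v then rest.headD 0 + 1 else 0) :: rest

def pvRuns2 (Q : List Int) (v : Int) (n : Nat) : List Int :=
  pvRuns2Go Q v n (2 * n) 0

-- Source B's circ_runs(): [min(run2[i], n) for i in range(n)]
def pvCircRuns (Q : List Int) (v : Int) (n : Nat) : List Int :=
  let run2 := pvRuns2 Q v n
  (List.range n).map (fun i => min (run2.getD i 0) (n : Int))

-- Source B's final argmax loop over enumerate(scores)
def pvBestLoop (l : List (Int × Int)) (best till : Int) : Int :=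
  match l with
  | [] => till
  | (x, s) :: rest => if s > best then pvBestLoop rest s x else pvBestLoop rest best till

def TheEngine_alt (P : List Int) (Q : List Int) : Int :=
  let n := Q.length
  if n = 0 then 0
  else
    let m := P.length
    let v := P.headD 0
    if n ≤ m then
      if Q.all (fun q => q = Q.headD 0) then 0
      else pvBestLoop (PySem.List.enumerate (pvCircRuns Q v n) 0) 0 0
    else
      if P.all (fun p => p = v) then
        pvBestLoop (PySem.List.enumerate ((pvCircRuns Q v n).map (fun r => r * (m : Int))) 0) 0 0
      else
        let h := pvHeadRunLen P v
        pvBestLoop (PySem.List.enumerate ((List.range n).map (fun x => if Q.getD x 0 = v then h else 0)) 0) 0 0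

-- ===== PRECONDITION & SPEC =====
-- Pre_ excludes the inputs where A raises a TypeError (`None > int`): Q nonempty with either
-- P empty or every element of P equal to every element of Q (comparator then returns None).
def Pre_TheEngine (P : List Int) (Q : List Int) : Prop :=
  Q = [] ∨ (P ≠ [] ∧ ∃ a ∈ P, ∃ b ∈ Q, a ≠ b)
instance (P : List Int) (Q : List Int) : Decidable (Pre_TheEngine P Q) := by
  unfold Pre_TheEngine; infer_instance

def pvWitness_TheEngine : List Int × List Int := ([1, 2], [2, 1, 1])

def Spec_TheEngine (P : List Int) (Q : List Int) (out : Int) : Prop := out = TheEngine_alt P Q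
instance (P : List Int) (Q : List Int) (out : Int) : Decidable (Spec_TheEngine P Q out) := by
  unfold Spec_TheEngine; infer_instance

-- ===== CLAIM (what is proved, stated in full; the proofs are below) =====
def Claim_equal_TheEngine : Prop := ∀ (P : List Int) (Q : List Int), Dom_TheEngine P Q → Pre_TheEngine P Q → Spec_TheEngine P Q (TheEngine P Q)

-- ===== LEMMAS AND PROOFS =====

-- ---- closed form of comparator's inner loop ----
theorem inner_spec (c1 : Int) : ∀ (S : List Int) (acc : Int),
    pvInner c1 S acc =
      if S.all (fun b => b = c1) then .ok (acc + (S.length : Int))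
      else .error (acc + pvHeadRunLen S c1)
  | [], acc => by simp [pvInner]
  | c2 :: S', acc => by
    by_cases h : c1 = c2
    · subst h
      rw [pvInner, if_neg (by simp), inner_spec c1 S' (acc + 1)]
      by_cases hall : (S'.all fun b => decide (b = c1)) = true
      · rw [if_pos hall,
          if_pos (show ((c1 :: S').all fun b => decide (b = c1)) = true by simp [hall])]
        congr 1
        simp only [List.length_cons]
        push_cast
        ring
      · rw [if_neg hall, if_neg (by simp [hall])]
        congr 1
        rw [show pvHeadRunLen (c1 :: S') c1 = pvHeadRunLen S' c1 + 1 from by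
          simp [pvHeadRunLen]]
        ring
    · have h2 : ¬ (c2 = c1) := fun hc => h hc.symm
      rw [pvInner, if_pos h, if_neg (by simp [h2])]
      congr 1
      simp [pvHeadRunLen, h2]

theorem headRun_nonneg (v : Int) : ∀ (L : List Int), 0 ≤ pvHeadRunLen L v
  | [] => by simp [pvHeadRunLen]
  | a :: t => by
    by_cases h : a = v <;> simp [pvHeadRunLen, h]
    have := headRun_nonneg v t; omega

theorem headRun_le (v : Int) : ∀ (L : List Int), pvHeadRunLen L v ≤ (L.length : Int)
  | [] => by simp [pvHeadRunLen]
  | a :: t => by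
    by_cases h : a = v <;> simp [pvHeadRunLen, h]
    · have := headRun_le v t; push_cast; omega
    · have := headRun_nonneg v t
      have := headRun_le v t; push_cast; omega

theorem headRun_lt_of_not_all (v : Int) :
    ∀ (L : List Int), ¬ (L.all (fun b => b = v) = true) → pvHeadRunLen L v < (L.length : Int)
  | [], h => by simp at h
  | a :: t, h => by
    by_cases ha : a = v
    · subst ha
      simp only [List.all_cons, decide_true, Bool.true_and] at h
      have := headRun_lt_of_not_all a t h
      simp [pvHeadRunLen]; push_cast; omega
    · simp only [pvHeadRunLen, ha, ite_false, List.length_cons]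
      push_cast; omega

theorem headRun_append (v : Int) : ∀ (A B : List Int),
    pvHeadRunLen (A ++ B) v =
      if A.all (fun b => b = v) then (A.length : Int) + pvHeadRunLen B v
      else pvHeadRunLen A v
  | [], B => by simp [pvHeadRunLen]
  | a :: A', B => by
    by_cases h : a = v
    · subst h
      simp only [List.cons_append, pvHeadRunLen, if_pos rfl, headRun_append a A' B,
        List.all_cons, decide_true, Bool.true_and]
      by_cases hall : A'.all (fun b => b = a) <;> simp [hall] <;> try (push_cast; ring)
    · simp [pvHeadRunLen, h, List.cons_append]

-- ---- closed forms of comparator's outer loop ----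
theorem outer_not_all_head (c1 : Int) (L' S : List Int) (acc : Int)
    (h : ¬ (S.all (fun b => b = c1) = true)) :
    pvOuter (c1 :: L') S acc = some (acc + pvHeadRunLen S c1) := by
  simp [pvOuter, inner_spec, h]

theorem outer_const (w : Int) : ∀ (L S : List Int) (acc : Int), S ≠ [] → (∀ b ∈ S, b = w) →
    pvOuter L S acc =
      if L.all (fun a => a = w) then none
      else some (acc + pvHeadRunLen L w * (S.length : Int))
  | [], S, acc, _, _ => by simp [pvOuter]
  | c1 :: L', S, acc, hS, hw => by
    by_cases h : c1 = w
    · subst h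
      have hall : S.all (fun b => b = c1) = true := by
        simp only [List.all_eq_true, decide_eq_true_eq]; exact hw
      rw [pvOuter]
      simp only [inner_spec, hall, if_pos]
      rw [outer_const c1 L' S (acc + (S.length : Int)) hS hw]
      by_cases hall' : L'.all (fun a => a = c1) <;>
        simp [hall', pvHeadRunLen] <;> try (push_cast; ring)
    · have hnall : ¬ (S.all (fun b => b = c1) = true) := by
        obtain ⟨b, hb⟩ := List.exists_mem_of_ne_nil S hS
        simp only [List.all_eq_true, decide_eq_true_eq, not_forall]
        exact ⟨b, hb, by rw [hw b hb]; exact fun hc => h hc.symm⟩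
      rw [outer_not_all_head c1 L' S acc hnall]
      have h0 : pvHeadRunLen S c1 = 0 := by
        obtain ⟨b, S', rfl⟩ := List.exists_cons_of_ne_nil hS
        have hb : b = w := hw b (by simp)
        have h' : ¬ (b = c1) := by rw [hb]; exact fun hc => h hc.symm
        simp [pvHeadRunLen, h']
      simp [h0, List.all_cons, h, pvHeadRunLen]

-- ---- shifter is rotation by one ----
theorem shifter_rotate : ∀ (L : List Int), pvShifter L = L.rotate 1
  | [] => by simp [pvShifter]
  | h :: t => by simp [pvShifter, List.rotate_cons_succ, List.rotate_zero]

-- ---- run2 array: suffix runs of the doubled list ----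
def hrListAux (v : Int) : List Int → List Int
  | [] => []
  | a :: t => (if a = v then (hrListAux v t).headD 0 + 1 else 0) :: hrListAux v t

theorem getD_doubled (Q : List Int) (i : Nat) (hi : i < 2 * Q.length) :
    (Q ++ Q).getD i 0 = Q.getD (i % Q.length) 0 := by
  have hn : 0 < Q.length := by omega
  by_cases h : i < Q.length
  · rw [Nat.mod_eq_of_lt h]
    rw [List.getD_eq_getElem (Q ++ Q) 0 (by simp; omega), List.getD_eq_getElem Q 0 h]
    simp [List.getElem_append, h]
  · have h2 : i - Q.length < Q.length := by omega
    have heq : i % Q.length = i - Q.length := by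
      conv_lhs => rw [show i = (i - Q.length) + 1 * Q.length by omega]
      rw [Nat.add_mul_mod_self_right, Nat.mod_eq_of_lt h2]
    rw [heq, List.getD_eq_getElem (Q ++ Q) 0 (by simp; omega), List.getD_eq_getElem Q 0 h2]
    simp [List.getElem_append, h]

theorem runs2Go_spec (Q : List Int) (v : Int) : ∀ (fuel i : Nat),
    i + fuel = 2 * Q.length →
    pvRuns2Go Q v Q.length fuel i = hrListAux v ((Q ++ Q).drop i)
  | 0, i, h => by
    have : (Q ++ Q).drop i = [] := by
      apply List.drop_eq_nil_of_le; simp; omega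
    simp [pvRuns2Go, this, hrListAux]
  | fuel + 1, i, h => by
    have hi : i < (Q ++ Q).length := by simp; omega
    have hd : (Q ++ Q).drop i = (Q ++ Q)[i] :: (Q ++ Q).drop (i + 1) :=
      List.drop_eq_getElem_cons hi
    have hget : (Q ++ Q)[i] = Q.getD (i % Q.length) 0 := by
      rw [← getD_doubled Q i (by omega)]
      exact (List.getD_eq_getElem (Q ++ Q) 0 hi).symm
    rw [pvRuns2Go, runs2Go_spec Q v fuel (i + 1) (by omega), hd, hrListAux, hget]

theorem hr_getElem? (v : Int) : ∀ (L : List Int) (j : Nat),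
    ((hrListAux v L)[j]?).getD 0 = pvHeadRunLen (L.drop j) v
  | [], j => by simp [hrListAux, pvHeadRunLen]
  | a :: t, 0 => by
    have hh : (hrListAux v t).headD 0 = pvHeadRunLen t v := by
      have h0 := hr_getElem? v t 0
      rw [List.headD_eq_head?_getD, List.head?_eq_getElem?]
      simpa using h0
    simp only [hrListAux, List.getElem?_cons_zero, Option.getD_some, List.drop_zero,
      pvHeadRunLen, hh]
  | a :: t, j + 1 => by
    simp [hrListAux, hr_getElem? v t j]

theorem hr_getD (v : Int) (L : List Int) (j : Nat) :
    (hrListAux v L).getD j 0 = pvHeadRunLen (L.drop j) v := by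
  rw [List.getD_eq_getElem?_getD]; exact hr_getElem? v L j

-- ---- circ_runs gives the head run of each rotation ----
theorem circRuns_spec (Q : List Int) (v : Int) (x : Nat) (hx : x < Q.length)
    (hnall : ¬ (Q.all (fun b => b = v) = true)) :
    (pvCircRuns Q v Q.length).getD x 0 = pvHeadRunLen (Q.rotate x) v := by
  have hxle : x ≤ Q.length := le_of_lt hx
  have hrot : Q.rotate x = Q.drop x ++ Q.take x :=
    List.rotate_eq_drop_append_take hxle
  have hrun2 : (pvRuns2 Q v Q.length).getD x 0 = pvHeadRunLen (Q.drop x ++ Q) v := by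
    rw [pvRuns2, runs2Go_spec Q v (2 * Q.length) 0 (by omega), List.drop_zero,
      hr_getD, List.drop_append_of_le_length hxle]
  -- value of the run, and the bound run < n
  have hsplit : Q.take x ++ Q.drop x = Q := List.take_append_drop x Q
  have key : pvHeadRunLen (Q.drop x ++ Q) v = pvHeadRunLen (Q.rotate x) v ∧
      pvHeadRunLen (Q.drop x ++ Q) v < (Q.length : Int) := by
    by_cases hall : (Q.drop x).all (fun b => b = v)
    · have htall : ¬ ((Q.take x).all (fun b => b = v) = true) := by
        intro htall
        apply hnall
        rw [← hsplit, List.all_append, htall, hall, Bool.and_self]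
      have hQ : pvHeadRunLen Q v = pvHeadRunLen (Q.take x) v := by
        conv_lhs => rw [← hsplit]
        rw [headRun_append, if_neg htall]
      have h1 : pvHeadRunLen (Q.drop x ++ Q) v
          = ((Q.drop x).length : Int) + pvHeadRunLen (Q.take x) v := by
        rw [headRun_append, if_pos hall, hQ]
      have h2 : pvHeadRunLen (Q.rotate x) v
          = ((Q.drop x).length : Int) + pvHeadRunLen (Q.take x) v := by
        rw [hrot, headRun_append, if_pos hall]
      have hlt := headRun_lt_of_not_all v (Q.take x) htall
      have hlen : ((Q.take x).length : Int) = (x : Int) := by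
        simp [List.length_take, Nat.min_eq_left hxle]
      have hdl : ((Q.drop x).length : Int) = (Q.length : Int) - (x : Int) := by
        simp only [List.length_drop]
        push_cast [Nat.cast_sub hxle]
        ring
      exact ⟨by rw [h1, h2], by rw [h1]; omega⟩
    · have h1 : pvHeadRunLen (Q.drop x ++ Q) v = pvHeadRunLen (Q.drop x) v := by
        rw [headRun_append, if_neg hall]
      have h2 : pvHeadRunLen (Q.rotate x) v = pvHeadRunLen (Q.drop x) v := by
        rw [hrot, headRun_append, if_neg hall]
      have hlt := headRun_lt_of_not_all v (Q.drop x) hall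
      have hle : ((Q.drop x).length : Int) ≤ (Q.length : Int) := by
        simp only [List.length_drop]
        push_cast [Nat.cast_sub hxle]
        omega
      exact ⟨by rw [h1, h2], by rw [h1]; omega⟩
  have hge : 0 ≤ pvHeadRunLen (Q.drop x ++ Q) v := headRun_nonneg v _
  have hmap : (pvCircRuns Q v Q.length).getD x 0 =
      min ((pvRuns2 Q v Q.length).getD x 0) ((Q.length : Int)) := by
    unfold pvCircRuns
    rw [List.getD_eq_getElem?_getD, List.getElem?_map, List.getElem?_range hx]
    simp
  rw [hmap, hrun2, min_eq_left (le_of_lt key.2), key.1]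

-- ---- the engine loop equals the argmax fold over the per-rotation scores ----
theorem bestLoop_ge : ∀ (l : List (Int × Int)) (best till : Int),
    (∀ p ∈ l, p.2 ≤ best) → pvBestLoop l best till = till
  | [], best, till, _ => rfl
  | (x, s) :: rest, best, till, h => by
    have hs : s ≤ best := h (x, s) (by simp)
    rw [pvBestLoop, if_neg (by omega)]
    exact bestLoop_ge rest best till (fun p hp => h p (by simp [hp]))

theorem engine_loop_eq (P Q0 : List Int) (f : Nat → Int) : ∀ (k j : Nat) (cp till : Int),
    (∀ i, i < j + k → pvComparator P (Q0.rotate i) = some (f i)) →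
    pvEngineLoop P k (Q0.rotate j) cp (j : Int) till =
      some (pvBestLoop ((List.range' j k).map (fun (i : Nat) => ((i : Int), f i))) cp till)
  | 0, j, cp, till, _ => by simp [pvEngineLoop, pvBestLoop]
  | k + 1, j, cp, till, h => by
    have hcomp := h j (by omega)
    have hshift : pvShifter (Q0.rotate j) = Q0.rotate (j + 1) := by
      rw [shifter_rotate, List.rotate_rotate]
    have hrec : ∀ i, i < (j + 1) + k → pvComparator P (Q0.rotate i) = some (f i) :=
      fun i hi => h i (by omega)
    rw [pvEngineLoop, hcomp, List.range'_succ, List.map_cons, pvBestLoop]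
    dsimp only
    by_cases hgt : f j > cp
    · rw [if_pos hgt, if_pos hgt, hshift,
        show (j : Int) + 1 = ((j + 1 : Nat) : Int) by push_cast; ring]
      exact engine_loop_eq P Q0 f k (j + 1) (f j) (j : Int) hrec
    · rw [if_neg hgt, if_neg hgt, hshift,
        show (j : Int) + 1 = ((j + 1 : Nat) : Int) by push_cast; ring]
      exact engine_loop_eq P Q0 f k (j + 1) cp till hrec

-- enumerate of a list of length n is the range'-indexed pairing
theorem enumerate_eq_range' (scores : List Int) :
    PySem.List.enumerate scores 0 =
      (List.range' 0 scores.length).map (fun (i : Nat) => ((i : Int), scores.getD i 0)) := by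
  apply List.ext_getElem?
  intro k
  rw [PySem.List.getElem?_enumerate]
  by_cases hk : k < scores.length
  · rw [List.getElem?_map, List.getElem?_range' hk]
    simp [List.getElem?_eq_getElem hk, List.getD_eq_getElem _ _ hk]
  · rw [List.getElem?_eq_none (l := scores) (by omega),
      List.getElem?_eq_none (by simp; omega)]
    simp

-- A's engine as a best-loop over scores, given a pointwise comparator description
theorem engine_as_best (P Q : List Int) (f : Nat → Int)
    (h : ∀ i, i < Q.length → pvComparator P (Q.rotate i) = some (f i)) :
    TheEngine P Q =
      pvBestLoop ((List.range' 0 Q.length).map (fun (i : Nat) => ((i : Int), f i))) 0 0 := by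
  unfold TheEngine
  have := engine_loop_eq P Q f Q.length 0 0 0 (fun i hi => h i (by omega))
  rw [List.rotate_zero] at this
  rw [show ((0 : Nat) : Int) = (0 : Int) from rfl] at this
  rw [this]
  rfl

-- in the all-equal-rotation case the best loop returns 0
theorem bestLoop_const_zero (c : Int) (n : Nat) (hn : 0 < n) :
    pvBestLoop ((List.range' 0 n).map (fun (i : Nat) => ((i : Int), c))) 0 0 = 0 := by
  obtain ⟨k, rfl⟩ := Nat.exists_eq_succ_of_ne_zero (by omega : n ≠ 0)
  rw [List.range'_succ, List.map_cons, pvBestLoop]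
  have hall : ∀ p ∈ (List.range' 1 k).map (fun (i : Nat) => ((i : Int), c)), p.2 ≤ c := by
    intro p hp
    obtain ⟨i, _, rfl⟩ := List.mem_map.mp hp
    exact le_refl c
  by_cases hc : c > 0
  · rw [if_pos hc]
    exact bestLoop_ge _ c _ hall
  · rw [if_neg hc]
    exact bestLoop_ge _ 0 _ (fun p hp => by
      obtain ⟨i, _, rfl⟩ := List.mem_map.mp hp; omega)

-- two best loops over pointwise-equal score lists agree
theorem bestLoop_congr (f g : Nat → Int) (n : Nat)
    (h : ∀ i, i < n → f i = g i) (b t : Int) :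
    pvBestLoop ((List.range' 0 n).map (fun (i : Nat) => ((i : Int), f i))) b t =
      pvBestLoop ((List.range' 0 n).map (fun (i : Nat) => ((i : Int), g i))) b t := by
  congr 1
  apply List.map_congr_left
  intro i hi
  rw [List.mem_range'_1] at hi
  rw [h i (by omega)]

-- head of a rotation
theorem headD_rotate (Q : List Int) (x : Nat) (hx : x < Q.length) :
    (Q.rotate x).headD 0 = Q.getD x 0 := by
  rw [List.rotate_eq_drop_append_take (le_of_lt hx)]
  have hne : Q.drop x ≠ [] := by
    intro h
    have := List.drop_eq_nil_iff.mp h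
    omega
  obtain ⟨a, t, hat⟩ := List.exists_cons_of_ne_nil hne
  have hlen0 : 0 < (Q.drop x).length := by simp; omega
  have ha : a = Q[x] := by
    have hget : (Q.drop x)[0] = Q[x + 0] := List.getElem_drop (h := by simpa using hlen0)
    simp [hat] at hget
    simpa using hget
  simp [hat, ha, List.getD_eq_getElem?_getD, List.getElem?_eq_getElem hx]

-- a list that is not all-equal-to-its-head has an element different from anything
theorem exists_ne_of_not_const (Q : List Int) (hn : ¬ (Q.all (fun q => q = Q.headD 0) = true))
    (w : Int) : ∃ b ∈ Q, b ≠ w := by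
  obtain ⟨q0, t, rfl⟩ : ∃ q0 t, Q = q0 :: t := by
    cases Q with
    | nil => simp at hn
    | cons a t => exact ⟨a, t, rfl⟩
  simp only [List.headD_cons, List.all_eq_true, decide_eq_true_eq, not_forall] at hn
  obtain ⟨b, hb, hbq⟩ := hn
  by_cases hw : q0 = w
  · exact ⟨b, hb, by rw [← hw]; exact hbq⟩
  · exact ⟨q0, by simp, hw⟩

-- pointwise-described comparator + pointwise-equal scores ⇒ A equals B's best loop
theorem main_case (P Q : List Int) (f : Nat → Int) (scores : List Int)
    (hlen : scores.length = Q.length)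
    (hcomp : ∀ i, i < Q.length → pvComparator P (Q.rotate i) = some (f i))
    (hpt : ∀ i, i < Q.length → f i = scores.getD i 0) :
    TheEngine P Q = pvBestLoop (PySem.List.enumerate scores 0) 0 0 := by
  rw [engine_as_best P Q f hcomp, enumerate_eq_range' scores, hlen]
  exact bestLoop_congr f (fun i => scores.getD i 0) Q.length hpt 0 0

theorem not_all_rotate (Q : List Int) (i : Nat) (w b : Int) (hb : b ∈ Q) (hbw : b ≠ w) :
    ¬ (((Q.rotate i).all fun c => decide (c = w)) = true) := by
  intro hall
  exact hbw (by simpa using List.all_eq_true.mp hall b (List.mem_rotate.mpr hb))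

theorem length_circRuns (Q : List Int) (v : Int) (n : Nat) :
    (pvCircRuns Q v n).length = n := by simp [pvCircRuns]

theorem getD_map_mul (l : List Int) (m : Int) (i : Nat) (hi : i < l.length) :
    (l.map (fun r => r * m)).getD i 0 = l.getD i 0 * m := by
  rw [List.getD_eq_getElem?_getD, List.getElem?_map, List.getElem?_eq_getElem hi]
  simp only [Option.map_some, Option.getD_some]
  rw [List.getD_eq_getElem _ _ hi]

theorem getD_map_range (g : Nat → Int) (n i : Nat) (hi : i < n) :
    ((List.range n).map (fun x => g x)).getD i 0 = g i := by
  rw [List.getD_eq_getElem?_getD, List.getElem?_map, List.getElem?_range hi]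
  simp

-- ===== VERDICT (by name: the statement is the Claim_ definition above) =====
theorem TheEngine_spec : Claim_equal_TheEngine := by
  unfold Claim_equal_TheEngine
  intro P Q _ hpre
  unfold Spec_TheEngine
  by_cases hQ : Q.length = 0
  · have hQnil : Q = [] := List.length_eq_zero_iff.mp hQ
    subst hQnil
    simp [TheEngine, TheEngine_alt, pvEngineLoop]
  · rcases hpre with rfl | ⟨hP, a, haP, b, hbQ, hab⟩
    · simp at hQ
    have hQne : Q ≠ [] := by intro h; subst h; simp at hQ
    obtain ⟨p0, P', rfl⟩ := List.exists_cons_of_ne_nil hP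
    have hv : (p0 :: P').headD 0 = p0 := rfl
    have hrotne : ∀ i : Nat, Q.rotate i ≠ [] := by
      intro i h
      have := List.length_rotate (l := Q) (n := i)
      rw [h] at this
      simp at this
      exact hQ this.symm
    have hrotlen : ∀ i : Nat, (Q.rotate i).length = Q.length := fun i => List.length_rotate Q i
    unfold TheEngine_alt
    rw [if_neg hQ]
    by_cases hnm : Q.length ≤ (p0 :: P').length
    · rw [if_pos hnm]
      by_cases hc : (Q.all fun q => decide (q = Q.headD 0)) = true
      · -- Q is constant: every rotation scores the same, both sides give 0
        rw [if_pos hc]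
        set w := Q.headD 0 with hw
        have hmemw : ∀ x ∈ Q, x = w := fun x hx => by
          simpa using List.all_eq_true.mp hc x hx
        have hPnall : ¬ (((p0 :: P').all fun c => decide (c = w)) = true) := by
          intro hall
          have hbw : b = w := hmemw b hbQ
          have haw : a = w := by simpa using List.all_eq_true.mp hall a haP
          exact hab (by rw [haw, hbw])
        have hcomp : ∀ i, i < Q.length →
            pvComparator (p0 :: P') (Q.rotate i) =
              some (0 + pvHeadRunLen (p0 :: P') w * (Q.length : Int)) := by
          intro i hi
          unfold pvComparator
          rw [if_pos (by rw [hrotlen i]; exact hnm)]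
          rw [outer_const w (p0 :: P') (Q.rotate i) 0 (hrotne i)
            (fun x hx => hmemw x (List.mem_rotate.mp hx))]
          rw [if_neg hPnall, hrotlen i]
        rw [engine_as_best (p0 :: P') Q _ hcomp]
        exact bestLoop_const_zero _ Q.length (by omega)
      · -- Q not constant: score of rotation i is the head run of p0 at position i
        rw [if_neg hc]
        obtain ⟨b', hb'Q, hb'⟩ := exists_ne_of_not_const Q hc p0
        have hQnall : ¬ ((Q.all fun c => decide (c = p0)) = true) := by
          intro hall
          exact hb' (by simpa using List.all_eq_true.mp hall b' hb'Q)
        apply main_case (p0 :: P') Q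
          (fun i => 0 + pvHeadRunLen (Q.rotate i) p0) (pvCircRuns Q p0 Q.length)
          (length_circRuns Q p0 Q.length)
        · intro i hi
          unfold pvComparator
          rw [if_pos (by rw [hrotlen i]; exact hnm)]
          exact outer_not_all_head p0 P' (Q.rotate i) 0 (not_all_rotate Q i p0 b' hb'Q hb')
        · intro i hi
          rw [circRuns_spec Q p0 i hi hQnall]
          ring
    · rw [if_neg hnm]
      by_cases hpc : ((p0 :: P').all fun p => decide (p = (p0 :: P').headD 0)) = true
      · -- P is constant: score is (head run of p0 in rotation i) * len(P)
        rw [if_pos hpc]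
        have hmemv : ∀ x ∈ p0 :: P', x = p0 := fun x hx => by
          simpa using List.all_eq_true.mp hpc x hx
        have hbv : b ≠ p0 := by
          intro h
          exact hab (by rw [hmemv a haP, h])
        have hQnall : ¬ ((Q.all fun c => decide (c = p0)) = true) := by
          intro hall
          exact hbv (by simpa using List.all_eq_true.mp hall b hbQ)
        apply main_case (p0 :: P') Q
          (fun i => 0 + pvHeadRunLen (Q.rotate i) p0 * ((p0 :: P').length : Int))
          ((pvCircRuns Q p0 Q.length).map (fun r => r * ((p0 :: P').length : Int)))
          (by simp [length_circRuns])
        · intro i hi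
          unfold pvComparator
          rw [if_neg (by rw [hrotlen i]; exact hnm)]
          rw [outer_const p0 (Q.rotate i) (p0 :: P') 0 (by simp) hmemv]
          rw [if_neg (not_all_rotate Q i p0 b hbQ hbv)]
        · intro i hi
          rw [getD_map_mul _ _ i (by rw [length_circRuns]; exact hi),
            circRuns_spec Q p0 i hi hQnall]
          ring
      · -- P not constant: score is h if the rotation starts with p0, else 0
        rw [if_neg hpc]
        have hPnall : ∀ c1 : Int, ¬ (((p0 :: P').all fun x => decide (x = c1)) = true) := by
          intro c1 hall
          apply hpc
          have hp0 : p0 = c1 := by simpa using List.all_eq_true.mp hall p0 (by simp)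
          subst hp0
          simpa using hall
        apply main_case (p0 :: P') Q
          (fun i => 0 + pvHeadRunLen (p0 :: P') (Q.getD i 0))
          ((List.range Q.length).map
            (fun x => if Q.getD x 0 = (p0 :: P').headD 0 then pvHeadRunLen (p0 :: P') ((p0 :: P').headD 0) else 0))
          (by simp)
        · intro i hi
          unfold pvComparator
          rw [if_neg (by rw [hrotlen i]; exact hnm)]
          obtain ⟨r0, rest, hre⟩ := List.exists_cons_of_ne_nil (hrotne i)
          have hr0 : r0 = Q.getD i 0 := by
            rw [← headD_rotate Q i (by omega), hre]
            rfl
          rw [hre, outer_not_all_head r0 rest (p0 :: P') 0 (hPnall r0), hr0]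
        · intro i hi
          rw [getD_map_range _ _ i hi, hv]
          by_cases hq : Q.getD i 0 = p0
          · rw [if_pos hq, hq]
            ring
          · rw [if_neg hq]
            have hne : ¬ (p0 = Q.getD i 0) := fun h => hq h.symm
            have h0 : pvHeadRunLen (p0 :: P') (Q.getD i 0) = 0 := by
              simp only [pvHeadRunLen]
              rw [if_neg hne]
            rw [h0]
            ring
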